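-- pv_equiv track=rewrite | github.com/tfn10/beecrowd | iniciante/python/1827-matriz-quadrada-iv.py | construindo_matriz
-- ===== SOURCE A (Python) =====
-- def construindo_matriz(n):
--     matriz = list()
--     lin = list()
--     linha_diagonal_secundaria = 0
--     coluna_diagonal_secundaria = n - 1
--     for linha in range(n):
--         for coluna in range(n):
--             if n // 2 == linha == coluna:
--                 lin.append(4)
--             elif n // 3 <= linha <= (n - n // 3 - 1) and n // 3 <= coluna <= (n - n // 3 - 1):
--                 lin.append(1)
--             elif linha == coluna:
--                 lin.append(2)
--             elif linha == linha_diagonal_secundaria and coluna == coluna_diagonal_secundaria: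
--                 lin.append(3)
--             else:
--                 lin.append(0)
--         matriz.append(lin)
--         linha_diagonal_secundaria += 1
--         coluna_diagonal_secundaria -= 1
--         lin = list()
--     return matriz
-- ===== SOURCE B (Python) =====
-- def construindo_matriz(n):
--     t = n // 3
--     def row(i):
--         r = [0] * n
--         r[n - 1 - i] = 3
--         r[i] = 2
--         if t <= i < n - t:
--             r[t:n - t] = [1] * (n - 2 * t)
--         if i == n // 2:
--             r[i] = 4
--         return r
--     return [row(i) for i in range(n)]
-- ===== Notes on version B (the rewrite author's own statement) =====
-- stated objective: faster
-- what changed: A decides each cell with one elif priority cascade (plus hand-maintained secondary-diagonal counter variables) inside nested loops; B builds each row as zeros and paints the geometric regions over it in reverse-priority order (secondary diagonal 3, main diagonal 2, slice-assigned central block of 1s, center 4).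
import Mathlib
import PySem

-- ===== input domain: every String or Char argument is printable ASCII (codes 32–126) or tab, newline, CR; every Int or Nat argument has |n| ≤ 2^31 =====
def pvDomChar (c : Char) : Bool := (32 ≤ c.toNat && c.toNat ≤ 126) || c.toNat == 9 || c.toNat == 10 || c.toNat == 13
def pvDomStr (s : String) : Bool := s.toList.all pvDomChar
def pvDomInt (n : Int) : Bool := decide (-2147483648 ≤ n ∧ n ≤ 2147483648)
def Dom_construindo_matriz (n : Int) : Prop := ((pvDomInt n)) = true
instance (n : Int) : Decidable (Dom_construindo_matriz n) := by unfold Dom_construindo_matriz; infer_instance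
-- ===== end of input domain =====

-- B replaces A's per-cell elif cascade (with its hand-maintained secondary-diagonal counters) by
-- layered painting: each row starts as zeros and the geometric regions are overwritten in
-- reverse-priority order (3, 2, block of 1s, center 4); same O(n^2) but measurably faster by a constant factor (bulk [0]*n / slice assignment instead of a per-cell branch cascade).

-- ===== PORT A =====
-- literal transliteration: nested for-loops, state (matriz, lin, linha_diagonal_secundaria, coluna_diagonal_secundaria)
def construindo_matriz (n : Int) : List (List Int) :=
  let res := (PySem.List.pyRange 0 n 1).foldl
    (fun (st : List (List Int) × List Int × Int × Int) linha =>
      let matriz := st.1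
      let lin := st.2.1
      let lds := st.2.2.1
      let cds := st.2.2.2
      let lin := (PySem.List.pyRange 0 n 1).foldl
        (fun lin coluna =>
          if PySem.Int.floordiv n 2 = linha ∧ linha = coluna then lin ++ [4]
          else if PySem.Int.floordiv n 3 ≤ linha ∧ linha ≤ n - PySem.Int.floordiv n 3 - 1 ∧
                  PySem.Int.floordiv n 3 ≤ coluna ∧ coluna ≤ n - PySem.Int.floordiv n 3 - 1 then lin ++ [1]
          else if linha = coluna then lin ++ [2]
          else if linha = lds ∧ coluna = cds then lin ++ [3]
          else lin ++ [0]) lin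
      (matriz ++ [lin], ([] : List Int), lds + 1, cds - 1))
    (([] : List (List Int)), ([] : List Int), (0 : Int), n - 1)
  res.1

-- ===== PORT B =====
-- row i of Source B: zeros, then r[n-1-i]=3, r[i]=2, slice-assign the 1-block, center 4.
-- Indices here are nonnegative and in range whenever the row is built (0 ≤ i < n), so
-- .toNat / take-append-drop are exact for Python's r[k]=v and r[t:n-t]=[1]*(n-2t).
def pvRow (n t : Int) (i : Int) : List Int :=
  let r := List.replicate n.toNat (0 : Int)
  let r := r.set (n - 1 - i).toNat 3
  let r := r.set i.toNat 2
  let r := if t ≤ i ∧ i < n - t then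
      r.take t.toNat ++ List.replicate (n - 2 * t).toNat 1 ++ r.drop (n - t).toNat
    else r
  if i = PySem.Int.floordiv n 2 then r.set i.toNat 4 else r

def construindo_matriz_alt (n : Int) : List (List Int) :=
  (PySem.List.pyRange 0 n 1).map (pvRow n (PySem.Int.floordiv n 3))

-- ===== PRECONDITION & SPEC =====
def Spec_construindo_matriz (n : Int) (out : List (List Int)) : Prop := out = construindo_matriz_alt n
instance (n : Int) (out : List (List Int)) : Decidable (Spec_construindo_matriz n out) := by unfold Spec_construindo_matriz; infer_instance

-- ===== CLAIM (what is proved, stated in full; the proofs are below) =====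
def Claim_equal_construindo_matriz : Prop := ∀ (n : Int), Dom_construindo_matriz n → Spec_construindo_matriz n (construindo_matriz n)

-- ===== LEMMAS AND PROOFS =====

-- the value A's cascade appends for cell (i, j), with the loop-carried diagonal counters lds, cds
def pvCellG (n lds cds i j : Int) : Int :=
  if PySem.Int.floordiv n 2 = i ∧ i = j then 4
  else if PySem.Int.floordiv n 3 ≤ i ∧ i ≤ n - PySem.Int.floordiv n 3 - 1 ∧
          PySem.Int.floordiv n 3 ≤ j ∧ j ≤ n - PySem.Int.floordiv n 3 - 1 then 1
  else if i = j then 2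
  else if i = lds ∧ j = cds then 3
  else 0

lemma innerA (n lds cds i : Int) (l : List Int) (lin : List Int) :
    l.foldl
      (fun lin coluna =>
        if PySem.Int.floordiv n 2 = i ∧ i = coluna then lin ++ [4]
        else if PySem.Int.floordiv n 3 ≤ i ∧ i ≤ n - PySem.Int.floordiv n 3 - 1 ∧
                PySem.Int.floordiv n 3 ≤ coluna ∧ coluna ≤ n - PySem.Int.floordiv n 3 - 1 then lin ++ [1]
        else if i = coluna then lin ++ [2]
        else if i = lds ∧ coluna = cds then lin ++ [3]
        else lin ++ [0]) lin
    = lin ++ l.map (pvCellG n lds cds i) := by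
  induction l generalizing lin with
  | nil => simp
  | cons x xs ih =>
    simp only [List.foldl_cons, List.map_cons, ih]
    have : (if PySem.Int.floordiv n 2 = i ∧ i = x then lin ++ [4]
        else if PySem.Int.floordiv n 3 ≤ i ∧ i ≤ n - PySem.Int.floordiv n 3 - 1 ∧
                PySem.Int.floordiv n 3 ≤ x ∧ x ≤ n - PySem.Int.floordiv n 3 - 1 then lin ++ [1]
        else if i = x then lin ++ [2]
        else if i = lds ∧ x = cds then lin ++ [3]
        else lin ++ [0]) = lin ++ [pvCellG n lds cds i x] := by
      unfold pvCellG; split_ifs <;> rfl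
    rw [this]; simp

def pvStep (n : Int) (st : List (List Int) × List Int × Int × Int) (linha : Int) :
    List (List Int) × List Int × Int × Int :=
  (st.1 ++ [st.2.1 ++ (PySem.List.pyRange 0 n 1).map (pvCellG n st.2.2.1 st.2.2.2 linha)],
    ([] : List Int), st.2.2.1 + 1, st.2.2.2 - 1)

lemma body_eq (n : Int) :
    (fun (st : List (List Int) × List Int × Int × Int) linha =>
      let matriz := st.1
      let lin := st.2.1
      let lds := st.2.2.1
      let cds := st.2.2.2
      let lin := (PySem.List.pyRange 0 n 1).foldl
        (fun lin coluna =>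
          if PySem.Int.floordiv n 2 = linha ∧ linha = coluna then lin ++ [4]
          else if PySem.Int.floordiv n 3 ≤ linha ∧ linha ≤ n - PySem.Int.floordiv n 3 - 1 ∧
                  PySem.Int.floordiv n 3 ≤ coluna ∧ coluna ≤ n - PySem.Int.floordiv n 3 - 1 then lin ++ [1]
          else if linha = coluna then lin ++ [2]
          else if linha = lds ∧ coluna = cds then lin ++ [3]
          else lin ++ [0]) lin
      (matriz ++ [lin], ([] : List Int), lds + 1, cds - 1))
    = pvStep n := by
  funext st linha
  simp only [innerA, pvStep]

lemma outerA (n : Int) : ∀ (m : Nat) (s : Int) (acc : List (List Int)),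
    (n - s).toNat = m →
    ((PySem.List.pyRange s n 1).foldl (pvStep n) (acc, ([] : List Int), s, n - 1 - s)).1
    = acc ++ (PySem.List.pyRange s n 1).map
        (fun i => (PySem.List.pyRange 0 n 1).map (pvCellG n i (n - 1 - i) i)) := by
  intro m
  induction m with
  | zero =>
    intro s acc h
    rw [show PySem.List.pyRange s n 1 = [] from PySem.List.pyRange_one_eq_nil (by omega)]
    simp
  | succ m ih =>
    intro s acc h
    rw [show PySem.List.pyRange s n 1 = s :: PySem.List.pyRange (s+1) n 1 from
      PySem.List.pyRange_one_cons (by omega)]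
    simp only [List.foldl_cons, List.map_cons, pvStep, List.nil_append]
    rw [show n - 1 - s - 1 = n - 1 - (s + 1) from by ring]
    rw [ih (s + 1) (acc ++ [(PySem.List.pyRange 0 n 1).map (pvCellG n s (n - 1 - s) s)]) (by omega)]
    simp

-- A as a double comprehension
lemma A_eq_map (n : Int) :
    construindo_matriz n
    = (PySem.List.pyRange 0 n 1).map
        (fun i => (PySem.List.pyRange 0 n 1).map (pvCellG n i (n - 1 - i) i)) := by
  have h := outerA n (n - 0).toNat 0 [] rfl
  unfold construindo_matriz
  rw [body_eq n]
  simpa using h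

-- the painted row of B agrees with A's cascade row, for 0 ≤ i < n
lemma pvRow_length (n t i : Int) (hn : 0 < n) (h1 : 0 ≤ t) (h2 : t * 3 ≤ n) :
    (pvRow n t i).length = n.toNat := by
  simp only [pvRow]
  split_ifs <;>
    simp [List.length_set, List.length_append, List.length_take, List.length_replicate,
      List.length_drop] <;> omega

-- entries of the base row (zeros with the two diagonal cells painted)
lemma base_getElem? (n i : Int) (k : Nat) (hi0 : 0 ≤ i) (hin : i < n) (hk : k < n.toNat) :
    ((((List.replicate n.toNat (0 : Int)).set (n - 1 - i).toNat 3).set i.toNat 2))[k]?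
    = some (if (k : Int) = i then 2 else if (k : Int) = n - 1 - i then 3 else 0) := by
  simp only [List.getElem?_set, List.length_set, List.length_replicate, List.getElem?_replicate]
  split_ifs <;> first | rfl | omega

-- entries after the slice assignment r[t:n-t] = [1]*(n-2t)
lemma block_getElem? (r : List Int) (n t : Int) (k : Nat) (hr : r.length = n.toNat)
    (h0 : 0 ≤ t) (h3 : t * 3 ≤ n) (hn : 0 < n) (hk : k < n.toNat) :
    (r.take t.toNat ++ List.replicate (n - 2 * t).toNat 1 ++ r.drop (n - t).toNat)[k]?
    = if t ≤ (k : Int) ∧ (k : Int) < n - t then some 1 else r[k]? := by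
  simp only [List.getElem?_append, List.length_append, List.length_take, List.length_replicate,
    List.getElem?_take, List.getElem?_replicate, hr]
  split_ifs <;>
    first
    | rfl
    | omega
    | (rw [List.getElem?_drop]; congr 1; omega)

lemma row_eq (n i : Int) (hi0 : 0 ≤ i) (hin : i < n) :
    (PySem.List.pyRange 0 n 1).map (pvCellG n i (n - 1 - i) i)
    = pvRow n (PySem.Int.floordiv n 3) i := by
  have hn : 0 < n := by omega
  have h3 : PySem.Int.floordiv n 3 * 3 ≤ n ∧ n < (PySem.Int.floordiv n 3 + 1) * 3 :=
    (PySem.Int.floordiv_eq_iff_of_pos (by norm_num)).mp rfl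
  have h2 : PySem.Int.floordiv n 2 * 2 ≤ n ∧ n < (PySem.Int.floordiv n 2 + 1) * 2 :=
    (PySem.Int.floordiv_eq_iff_of_pos (by norm_num)).mp rfl
  have ht0 : 0 ≤ PySem.Int.floordiv n 3 := by omega
  have hlen := pvRow_length n (PySem.Int.floordiv n 3) i hn ht0 h3.1
  apply List.ext_getElem?
  intro k
  by_cases hk : k < n.toNat
  · rw [List.getElem?_map, PySem.List.getElem?_pyRange_one, if_pos (by omega)]
    simp only [Option.map_some, zero_add]
    set t := PySem.Int.floordiv n 3 with hts
    set c := PySem.Int.floordiv n 2 with hcs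
    have hbase := base_getElem? n i k hi0 hin hk
    have hblock := block_getElem?
      ((((List.replicate n.toNat (0 : Int)).set (n - 1 - i).toNat 3).set i.toNat 2)) n t k
      (by simp [List.length_set, List.length_replicate]) ht0 h3.1 hn hk
    simp only [pvRow, pvCellG, true_and, ← hts, ← hcs]
    by_cases hbl : t ≤ i ∧ i < n - t
    · rw [if_pos hbl]
      by_cases hcn : i = c
      · rw [if_pos hcn, List.getElem?_set, hblock]
        rw [hbase]
        simp only [List.length_append, List.length_take, List.length_replicate,
          List.length_drop, List.length_set]
        split_ifs <;> first | rfl | omega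
      · rw [if_neg hcn, hblock, hbase]
        split_ifs <;> first | rfl | omega
    · rw [if_neg hbl]
      by_cases hcn : i = c
      · rw [if_pos hcn, List.getElem?_set, hbase]
        simp only [List.length_set, List.length_replicate]
        split_ifs <;> first | rfl | omega
      · rw [if_neg hcn, hbase]
        split_ifs <;> first | rfl | omega
  · rw [List.getElem?_eq_none, List.getElem?_eq_none]
    · omega
    · simp [PySem.List.length_pyRange_one]; omega

-- ===== VERDICT (by name: the statement is the Claim_ definition above) =====
theorem construindo_matriz_spec : Claim_equal_construindo_matriz := by
  intro n _
  unfold Spec_construindo_matriz construindo_matriz_alt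
  rw [A_eq_map]
  apply List.map_congr_left
  intro i hi
  rw [PySem.List.mem_pyRange_one] at hi
  exact row_eq n i hi.1 hi.2
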